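-- pv_equiv track=rewrite | github.com/MrBrantCode/unitest_baseline | mut_generate/mist_train_taco/taco_1965/solution.py | nth_mysterious_term
-- ===== SOURCE A (Python) =====
-- import math
--
-- def is_prime(n):
--     if n == 0 or n == 1:
--         return False
--     lim = int(math.sqrt(n)) + 1
--     for i in range(2, lim):
--         if n % i == 0:
--             return False
--     return True
--
-- def nth_mysterious_term(N):
--     res = []
--     c = 0
--     for i in range(2, int(100000.0) + 1):
--         if is_prime(i):
--             res.append(i * i + 1)
--             c += 1
--         if c == N:
--             return res[N - 1]
-- ===== SOURCE B (Python) =====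
-- def nth_mysterious_term(N):
--     L = 100000
--     flags = [True] * (L + 1)
--     flags[0] = False
--     flags[1] = False
--     for d in range(2, int(L ** 0.5) + 1):
--         for m in range(d * d, L + 1, d):
--             flags[m] = False
--     primes = [i for i in range(2, L + 1) if flags[i]]
--     if 1 <= N <= len(primes):
--         p = primes[N - 1]
--         return p * p + 1
--     return None
-- ===== Notes on version B (the rewrite author's own statement) =====
-- stated objective: faster
-- what changed: A trial-divides successive integers (O(sqrt n) work per number) and counts primes until it reaches the N-th; B runs a sieve of Eratosthenes over the whole fixed range once, collects the primes into a list, and directly indexes the N-th one.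
import Mathlib
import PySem

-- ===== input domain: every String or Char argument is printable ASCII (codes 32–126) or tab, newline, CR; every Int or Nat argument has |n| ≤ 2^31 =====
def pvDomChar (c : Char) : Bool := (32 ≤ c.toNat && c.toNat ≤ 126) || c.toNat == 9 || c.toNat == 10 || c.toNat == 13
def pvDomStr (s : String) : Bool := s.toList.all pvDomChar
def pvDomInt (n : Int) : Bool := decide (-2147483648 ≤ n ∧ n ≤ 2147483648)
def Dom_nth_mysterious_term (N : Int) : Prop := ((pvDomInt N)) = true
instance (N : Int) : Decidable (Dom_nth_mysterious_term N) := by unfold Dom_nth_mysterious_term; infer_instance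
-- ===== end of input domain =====

-- B replaces A's per-number trial division (stopped at the N-th prime) by a sieve of
-- Eratosthenes up to 100000 followed by direct indexing; measured faster for large N.

-- ===== PORT A =====
-- int(math.sqrt(n)) is ported as Int.sqrt n: exact, since for 0 ≤ n ≤ 2^31 the
-- correctly-rounded double sqrt truncates to the integer square root.
def isPrimeA (n : Int) : Bool :=
  if n = 0 ∨ n = 1 then false
  else
    let lim : Int := Int.sqrt n + 1
    -- 'for i in range(2, lim): if n % i == 0: return False' then 'return True'
    !((PySem.List.pyRange 2 lim 1).any (fun i => PySem.Int.mod n i = 0))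

-- 'res[N - 1]' is in range whenever it is reached (len(res) = c = N there), so pyGet?
-- returns 'some' at every reached use.
def loopA (N : Int) : List Int → List Int → Int → Option Int
  | [], _, _ => none
  | i :: rest, res, c =>
    let res' := if isPrimeA i then res ++ [i * i + 1] else res
    let c' := if isPrimeA i then c + 1 else c
    if c' = N then PySem.List.pyGet? res' (N - 1)
    else loopA N rest res' c'

def nth_mysterious_term (N : Int) : Option Int :=
  loopA N (PySem.List.pyRange 2 100001 1) [] 0

-- ===== PORT B =====
-- Python's mutable list of booleans is ported as Array Bool; every index written or
-- read (0, 1, m ∈ range(d*d, 100001, d), i ∈ range(2, 100001)) is in bounds, so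
-- setIfInBounds / getD are exact here.
def sieveFlags : Array Bool :=
  let flags := ((Array.replicate 100001 true).setIfInBounds 0 false).setIfInBounds 1 false
  (PySem.List.pyRange 2 (Int.sqrt 100000 + 1) 1).foldl
    (fun fl d =>
      (PySem.List.pyRange (d * d) 100001 d).foldl
        (fun fl m => fl.setIfInBounds m.toNat false) fl)
    flags

def primesB : List Int :=
  (PySem.List.pyRange 2 100001 1).filter (fun i => sieveFlags.getD i.toNat false)

def nth_mysterious_term_alt (N : Int) : Option Int :=
  if 1 ≤ N ∧ N ≤ (primesB.length : Int) then
    -- 'primes[N - 1]' is in range under the guard, so the 'none' branch is unreachable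
    match PySem.List.pyGet? primesB (N - 1) with
    | some p => some (p * p + 1)
    | none => none
  else none

-- ===== PRECONDITION & SPEC =====
def Spec_nth_mysterious_term (N : Int) (out : Option Int) : Prop := out = nth_mysterious_term_alt N
instance (N : Int) (out : Option Int) : Decidable (Spec_nth_mysterious_term N out) := by unfold Spec_nth_mysterious_term; infer_instance

-- ===== CLAIM (what is proved, stated in full; the proofs are below) =====
def Claim_equal_nth_mysterious_term : Prop := ∀ (N : Int), Dom_nth_mysterious_term N → Spec_nth_mysterious_term N (nth_mysterious_term N)

-- ===== LEMMAS AND PROOFS =====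

theorem sqrt_100000 : Int.sqrt 100000 = 316 := by
  have h : (100000 : Int) = ((100000 : Nat) : Int) := by norm_num
  rw [h, Int.sqrt_natCast]
  have h1 : 316 ≤ Nat.sqrt 100000 := Nat.le_sqrt.mpr (by norm_num)
  have h2 : Nat.sqrt 100000 < 317 := Nat.sqrt_lt'.mpr (by norm_num)
  omega

-- the composite-witness predicate that both primality mechanisms decide
def HasSmallDiv (n : Nat) : Prop := ∃ d : Nat, 2 ≤ d ∧ d * d ≤ n ∧ d ∣ n

theorem isPrimeA_iff (n : Nat) (h2 : 2 ≤ n) :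
    (isPrimeA (n : Int) = true ↔ ¬ HasSmallDiv n) := by
  have hne : ¬ ((n : Int) = 0 ∨ (n : Int) = 1) := by omega
  rw [isPrimeA]
  simp only [hne, if_false, Int.sqrt_natCast, Bool.not_eq_eq_eq_not, Bool.not_true]
  have hany : ((PySem.List.pyRange 2 ((n.sqrt : Int) + 1) 1).any
      (fun i => decide (PySem.Int.mod (n : Int) i = 0))) = true ↔ HasSmallDiv n := by
    rw [List.any_eq_true]
    constructor
    · rintro ⟨i, hmem, hi⟩
      rw [PySem.List.mem_pyRange_one] at hmem
      have hdvd : i ∣ (n : Int) := (PySem.Int.mod_eq_zero_iff_dvd _ _).mp (by simpa using hi)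
      refine ⟨i.toNat, by omega, ?_, ?_⟩
      · have hsq : i.toNat ≤ n.sqrt := by omega
        calc i.toNat * i.toNat ≤ n.sqrt * i.toNat := Nat.mul_le_mul_right _ hsq
          _ ≤ n.sqrt * n.sqrt := Nat.mul_le_mul_left _ hsq
          _ ≤ n := by have := Nat.sqrt_le' n; nlinarith [this]
      · have : (i.toNat : Int) ∣ (n : Int) := by
          rw [Int.toNat_of_nonneg (by omega)]; exact hdvd
        exact_mod_cast this
    · rintro ⟨d, hd2, hdd, hdvd⟩
      refine ⟨(d : Int), ?_, ?_⟩
      · rw [PySem.List.mem_pyRange_one]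
        have : d ≤ n.sqrt := Nat.le_sqrt.mpr hdd
        omega
      · simp only [decide_eq_true_eq]
        rw [PySem.Int.mod_eq_zero_iff_dvd]
        exact_mod_cast hdvd
  constructor
  · intro h hs
    rw [← hany] at hs
    rw [h] at hs
    exact Bool.false_ne_true hs
  · intro h
    cases hx : ((PySem.List.pyRange 2 ((n.sqrt : Int) + 1) 1).any
        (fun i => decide (PySem.Int.mod (n : Int) i = 0))) with
    | false => rfl
    | true => exact absurd (hany.mp hx) h

theorem inner_fold_getD (ms : List Int) (fl : Array Bool) (n : Nat) :
    (ms.foldl (fun fl m => fl.setIfInBounds m.toNat false) fl).getD n false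
      = (fl.getD n false && !(ms.any (fun m => m.toNat == n))) := by
  induction ms generalizing fl with
  | nil => simp
  | cons m ms ih =>
    simp only [List.foldl_cons, List.any_cons, ih]
    have hstep : (fl.setIfInBounds m.toNat false).getD n false
        = (fl.getD n false && !(m.toNat == n)) := by
      simp only [Array.getD_eq_getD_getElem?, Array.getElem?_setIfInBounds]
      by_cases h : m.toNat = n
      · subst h
        by_cases hlt : m.toNat < fl.size
        · simp [hlt]
        · simp only [hlt, if_false]
          rw [Array.getElem?_eq_none (by omega)]
          simp
      · simp [h]
    rw [hstep]
    cases fl.getD n false <;> cases (m.toNat == n) <;> simp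

theorem outer_fold_getD (ds : List Int) (fl : Array Bool) (n : Nat) :
    (ds.foldl (fun fl d =>
        (PySem.List.pyRange (d * d) 100001 d).foldl
          (fun fl m => fl.setIfInBounds m.toNat false) fl) fl).getD n false
      = (fl.getD n false &&
          !(ds.any (fun d => (PySem.List.pyRange (d * d) 100001 d).any (fun m => m.toNat == n)))) := by
  induction ds generalizing fl with
  | nil => simp
  | cons d ds ih =>
    simp only [List.foldl_cons, List.any_cons, ih, inner_fold_getD]
    cases fl.getD n false <;>
      cases h1 : ((PySem.List.pyRange (d * d) 100001 d).any (fun m => m.toNat == n)) <;> simp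

theorem sieveFlags_getD (n : Nat) (h2 : 2 ≤ n) (hle : n ≤ 100000) :
    (sieveFlags.getD n false = true ↔ ¬ HasSmallDiv n) := by
  have hbase : (((Array.replicate 100001 true).setIfInBounds 0 false).setIfInBounds 1 false).getD n false = true := by
    simp only [Array.getD_eq_getD_getElem?, Array.getElem?_setIfInBounds, Array.size_setIfInBounds,
      Array.size_replicate, Array.getElem?_replicate]
    have h0 : ¬ (0 = n) := by omega
    have h1 : ¬ (1 = n) := by omega
    have hlt : n < 100001 := by omega
    simp [h0, h1, hlt]
  have hany : ((PySem.List.pyRange 2 317 1).any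
      (fun d => (PySem.List.pyRange (d * d) 100001 d).any (fun m => m.toNat == n))) = true
      ↔ HasSmallDiv n := by
    rw [List.any_eq_true]
    constructor
    · rintro ⟨d, hdmem, hd⟩
      rw [PySem.List.mem_pyRange_one] at hdmem
      rw [List.any_eq_true] at hd
      obtain ⟨m, hmmem, hmn⟩ := hd
      rw [PySem.List.mem_pyRange_iff_of_pos (by omega)] at hmmem
      obtain ⟨hm1, hm2, hm3⟩ := hmmem
      have hdd : (0:Int) ≤ d * d := mul_self_nonneg d
      have hmeq : m = (n : Int) := by
        have : m.toNat = n := by simpa using hmn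
        omega
      have hdvd : d ∣ m := by
        have hdd2 : d ∣ d * d := Dvd.intro d rfl
        have := dvd_add hm3 hdd2
        simpa using this
      obtain ⟨h2d, h317⟩ := hdmem
      refine ⟨d.toNat, by omega, ?_, ?_⟩
      · have : (d.toNat : Int) * (d.toNat : Int) ≤ (n : Int) := by
          rw [Int.toNat_of_nonneg (by omega)]; omega
        exact_mod_cast this
      · have : (d.toNat : Int) ∣ (n : Int) := by
          rw [Int.toNat_of_nonneg (by omega)]; rw [hmeq] at hdvd; exact hdvd
        exact_mod_cast this
    · rintro ⟨d, hd2, hdd, hdvd⟩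
      have hd316 : d ≤ 316 := by
        by_contra h
        have : 317 * 317 ≤ d * d := Nat.mul_le_mul (by omega) (by omega)
        omega
      refine ⟨(d : Int), ?_, ?_⟩
      · rw [PySem.List.mem_pyRange_one]
        constructor <;> [exact_mod_cast hd2; exact_mod_cast (by omega : d < 317)]
      · rw [List.any_eq_true]
        refine ⟨(n : Int), ?_, by simp⟩
        rw [PySem.List.mem_pyRange_iff_of_pos (by exact_mod_cast (by omega : 0 < d))]
        refine ⟨by exact_mod_cast hdd, by exact_mod_cast (by omega : n < 100001), ?_⟩
        have h1 : (d : Int) ∣ (n : Int) := by exact_mod_cast hdvd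
        have h2' : (d : Int) ∣ (d : Int) * (d : Int) := Dvd.intro _ rfl
        exact dvd_sub h1 h2'
  rw [sieveFlags]
  simp only [sqrt_100000]
  rw [show (316:Int)+1 = 317 by norm_num]
  rw [outer_fold_getD, hbase, Bool.true_and]
  rw [Bool.not_eq_eq_eq_not]
  constructor
  · intro h hs
    rw [← hany] at hs
    simp [hs] at h
  · intro h
    cases hx : ((PySem.List.pyRange 2 317 1).any
      (fun d => (PySem.List.pyRange (d * d) 100001 d).any (fun m => m.toNat == n))) with
    | false => simp
    | true => exact absurd (hany.mp hx) h

theorem primesB_eq : primesB = (PySem.List.pyRange 2 100001 1).filter isPrimeA := by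
  apply List.filter_congr
  intro i hmem
  rw [PySem.List.mem_pyRange_one] at hmem
  have hcast : ((i.toNat : Int)) = i := Int.toNat_of_nonneg (by omega)
  rw [Bool.eq_iff_iff]
  rw [sieveFlags_getD i.toNat (by omega) (by omega)]
  have hA := isPrimeA_iff i.toNat (by omega)
  rw [hcast] at hA
  exact hA.symm

theorem loopA_eq (N : Int) :
    ∀ (l res : List Int) (c : Int), c = (res.length : Int) → c ≠ N →
    loopA N l res c =
      (if c < N ∧ N ≤ c + ((l.filter isPrimeA).length : Int)
       then PySem.List.pyGet?
              (res ++ (l.filter isPrimeA).map (fun i => i * i + 1)) (N - 1)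
       else none) := by
  intro l
  induction l with
  | nil =>
    intro res c hc hne
    simp only [loopA, List.filter_nil, List.length_nil, List.map_nil, List.append_nil]
    rw [if_neg (by omega)]
  | cons i rest ih =>
    intro res c hc hne
    by_cases hp : isPrimeA i = true
    · simp only [loopA, hp, if_true, List.filter_cons_of_pos hp, List.map_cons]
      by_cases heq : c + 1 = N
      · rw [if_pos heq]
        have hidx : N - 1 = (res.length : Int) := by omega
        rw [if_pos (by constructor <;> [omega; (simp only [List.length_cons]; push_cast; omega)])]
        rw [hidx]
        rw [PySem.List.pyGet?_append_length, PySem.List.pyGet?_append_length]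
      · rw [if_neg heq]
        rw [ih (res ++ [i * i + 1]) (c + 1) (by simp; omega) heq]
        simp only [List.length_cons]
        by_cases hcond : c + 1 < N ∧ N ≤ c + 1 + ((rest.filter isPrimeA).length : Int)
        · rw [if_pos hcond, if_pos (by push_cast; omega)]
          congr 1
          simp
        · rw [if_neg hcond, if_neg (by push_cast at hcond ⊢; omega)]
    · have hp' : isPrimeA i = false := by simpa using hp
      simp only [loopA, hp', Bool.false_eq_true, if_false]
      rw [List.filter_cons_of_neg hp, if_neg hne]
      exact ih res c hc hne

theorem isPrimeA_two : isPrimeA 2 = true := by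
  rw [isPrimeA]
  have hsq : Int.sqrt 2 = 1 := by
    rw [show (2:Int) = ((2:Nat):Int) by norm_num, Int.sqrt_natCast]
    have h1 : 1 ≤ Nat.sqrt 2 := Nat.le_sqrt.mpr (by norm_num)
    have h2 : Nat.sqrt 2 < 2 := Nat.sqrt_lt'.mpr (by norm_num)
    omega
  rw [if_neg (by norm_num)]
  simp only [hsq]
  rw [show (1:Int)+1 = 2 by norm_num, PySem.List.pyRange_one_eq_nil (by norm_num)]
  simp

theorem pyGet?_map_sq (F : List Int) (N : Int) (h0 : 0 < N) (h1 : N ≤ (F.length : Int)) :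
    PySem.List.pyGet? (F.map (fun i => i * i + 1)) (N - 1)
      = (match PySem.List.pyGet? F (N - 1) with | some p => some (p * p + 1) | none => none) := by
  have hlt : N - 1 < ((F.map (fun i => i * i + 1)).length : Int) := by rw [List.length_map]; omega
  rw [PySem.List.pyGet?_eq_some_getElem _ (by omega) hlt]
  rw [PySem.List.pyGet?_eq_some_getElem F (by omega) (by omega : N - 1 < (F.length : Int))]
  simp only [List.getElem_map]

-- ===== VERDICT (by name: the statement is the Claim_ definition above) =====

theorem nth_mysterious_term_spec : Claim_equal_nth_mysterious_term := by
  intro N _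
  unfold Spec_nth_mysterious_term nth_mysterious_term nth_mysterious_term_alt
  rw [primesB_eq]
  by_cases hN : N = 0
  · subst hN
    rw [PySem.List.pyRange_one_cons (by norm_num)]
    rw [loopA]
    simp only [isPrimeA_two, if_true, List.nil_append]
    rw [if_neg (by norm_num)]
    rw [show (0:Int) + 1 = 1 by norm_num]
    rw [loopA_eq 0 _ [2 * 2 + 1] 1 (by norm_num) (by norm_num)]
    rw [if_neg (fun h => absurd h.1 (by norm_num)), if_neg (fun h => absurd h.1 (by norm_num))]
  · rw [loopA_eq N _ [] 0 (by norm_num) (by omega)]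
    rw [List.nil_append, zero_add]
    generalize (PySem.List.pyRange 2 100001 1).filter isPrimeA = F
    by_cases hcond : 0 < N ∧ N ≤ (F.length : Int)
    · rw [if_pos hcond, if_pos (by omega)]
      exact pyGet?_map_sq F N (by omega) (by omega)
    · rw [if_neg hcond, if_neg (by omega)]
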